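-- pv_equiv track=rewrite | github.com/Maximelebrocoli/comp8760 | assessment2/week19/exercise1.py | permission_string_to_octal
-- ===== SOURCE A (Python) =====
-- def permission_string_to_octal(permission_str):
--     if len(permission_str) != 9:
--         return "Invalid permission string length"
--
--     octal_permission = 0
--     for i, char in enumerate(permission_str):
--         if i % 3 == 0:                              # if we treated the first triplet of permissions
--             octal_permission <<= 3                  # shift permissions granted 3 bits to the left
--         if char != '-':
--             octal_permission |= 1 << (2 - i % 3)    # sets the correct bit of permission, let's say we have r in the first iteration : 2 - i = 0, so 1 is shifted 2 bits to left, resulting in transorming 0b001 in 0b100, effectively adding 4 to the value octal permission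
--
--     return oct(octal_permission)[2:]
-- ===== SOURCE B (Python) =====
-- def permission_string_to_octal(permission_str):
--     if len(permission_str) != 9:
--         return "Invalid permission string length"
--     value = 0
--     for start in (0, 3, 6):
--         digit = sum(w for w, ch in zip((4, 2, 1), permission_str[start:start + 3]) if ch != '-')
--         value = value * 8 + digit
--     return oct(value)[2:]
-- ===== Notes on version B (the rewrite author's own statement) =====
-- stated objective: simpler
-- what changed: Replaces the enumerate/bit-shift/bit-or accumulation over single characters by summing fixed weights (4,2,1) over each 3-character slice with zip and combining the three digits arithmetically (value*8+digit).
import Mathlib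
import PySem

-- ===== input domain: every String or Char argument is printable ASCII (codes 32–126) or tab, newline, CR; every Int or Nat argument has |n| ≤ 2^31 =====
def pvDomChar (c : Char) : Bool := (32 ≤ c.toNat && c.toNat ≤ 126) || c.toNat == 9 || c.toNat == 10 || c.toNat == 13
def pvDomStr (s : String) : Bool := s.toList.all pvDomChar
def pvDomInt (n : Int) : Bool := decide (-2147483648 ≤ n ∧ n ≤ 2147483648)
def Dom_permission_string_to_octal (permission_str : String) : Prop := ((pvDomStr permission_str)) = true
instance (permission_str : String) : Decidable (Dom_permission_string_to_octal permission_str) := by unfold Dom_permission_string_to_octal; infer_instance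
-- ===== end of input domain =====

-- B sums the fixed weights (4,2,1) over each 3-character slice and combines the digits
-- arithmetically, instead of A's enumerate/bit-shift/bit-or accumulation; objective: simpler.

-- ===== PORT A =====
-- oct(n)[2:] for a nonnegative Python int: base-8 digits without the '0o' prefix.
def pyOct (n : Nat) : String := String.ofList (Nat.toDigits 8 n)

-- the body of A's 'for i, char in enumerate(permission_str)' loop; state = (i, octal_permission)
def pvStepA (st : Nat × Nat) (char : Char) : Nat × Nat :=
  let i := st.1
  let acc := st.2
  let acc := if i % 3 = 0 then acc <<< 3 else acc
  let acc := if char ≠ '-' then acc ||| (1 <<< (2 - i % 3)) else acc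
  (i + 1, acc)

def permission_string_to_octal (permission_str : String) : String :=
  if PySem.Str.len permission_str ≠ 9 then "Invalid permission string length"
  else
    let st := permission_str.toList.foldl pvStepA (0, 0)
    pyOct st.2

-- ===== PORT B =====
-- digit = sum(w for w, ch in zip((4, 2, 1), permission_str[start:start + 3]) if ch != '-')
def pvTripletDigit (t : List Char) : Nat :=
  (List.zip [4, 2, 1] t).foldl (fun a p => if p.2 ≠ '-' then a + p.1 else a) 0

def permission_string_to_octal_alt (permission_str : String) : String :=
  if PySem.Str.len permission_str ≠ 9 then "Invalid permission string length"
  else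
    let cs := permission_str.toList
    let value := [(0 : Int), 3, 6].foldl
      (fun value start =>
        value * 8 + pvTripletDigit (PySem.List.slice cs (some start) (some (start + 3))))
      0
    pyOct value

-- ===== PRECONDITION & SPEC =====
def Spec_permission_string_to_octal (permission_str : String) (out : String) : Prop := out = permission_string_to_octal_alt permission_str
instance (permission_str : String) (out : String) : Decidable (Spec_permission_string_to_octal permission_str out) := by unfold Spec_permission_string_to_octal; infer_instance

-- ===== CLAIM (what is proved, stated in full; the proofs are below) =====
def Claim_equal_permission_string_to_octal : Prop := ∀ (permission_str : String), Dom_permission_string_to_octal permission_str → Spec_permission_string_to_octal permission_str (permission_string_to_octal permission_str)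

-- ===== LEMMAS AND PROOFS =====
theorem pv_exists9 (cs : List Char) (h : cs.length = 9) :
    ∃ a b c d e f g h' i, cs = [a, b, c, d, e, f, g, h', i] := by
  match cs, h with
  | [a, b, c, d, e, f, g, h', i], _ => exact ⟨a, b, c, d, e, f, g, h', i, rfl⟩

-- the octal digit of one triplet, in plain if/+ form
def pvDig (x y z : Char) : Nat :=
  (if x ≠ '-' then 4 else 0) + (if y ≠ '-' then 2 else 0) + (if z ≠ '-' then 1 else 0)

theorem pvDig_lt (x y z : Char) : pvDig x y z < 8 := by
  unfold pvDig; split_ifs <;> omega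

theorem pvTripletDigit_eq (x y z : Char) : pvTripletDigit [x, y, z] = pvDig x y z := by
  simp only [pvTripletDigit, pvDig, List.zip, List.zipWith, List.foldl]
  split_ifs <;> omega

theorem pv_shift_or (acc : Nat) (hacc : acc < 64) (v : Nat) (hv : v < 8) :
    acc <<< 3 ||| v = acc * 8 + v := by
  have h : ∀ (a : Fin 64) (w : Fin 8), a.val <<< 3 ||| w.val = a.val * 8 + w.val := by decide
  exact h ⟨acc, hacc⟩ ⟨v, hv⟩

theorem pv_mul_or (acc : Nat) (hacc : acc < 64) (v : Nat) (hv : v < 8) :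
    acc * 8 ||| v = acc * 8 + v := by
  have h : ∀ (a : Fin 64) (w : Fin 8), a.val * 8 ||| w.val = a.val * 8 + w.val := by decide
  exact h ⟨acc, hacc⟩ ⟨v, hv⟩
theorem pv_stepA_run3 (i0 acc : Nat) (hi : i0 % 3 = 0) (hacc : acc < 64)
    (x y z : Char) (rest : List Char) :
    List.foldl pvStepA (i0, acc) (x :: y :: z :: rest)
      = List.foldl pvStepA (i0 + 3, acc * 8 + pvDig x y z) rest := by
  have h1 : (i0 + 1) % 3 = 1 := by omega
  have h2 : (i0 + 2) % 3 = 2 := by omega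
  have s2 : (1 : Nat) <<< 2 = 4 := rfl
  have s1 : (1 : Nat) <<< 1 = 2 := rfl
  have s0 : (1 : Nat) <<< 0 = 1 := rfl
  have o21 : (2 : Nat) ||| 1 = 3 := rfl
  have o43 : (4 : Nat) ||| 3 = 7 := rfl
  have o42 : (4 : Nat) ||| 2 = 6 := rfl
  have o41 : (4 : Nat) ||| 1 = 5 := rfl
  have o61 : (6 : Nat) ||| 1 = 7 := rfl
  simp only [List.foldl, pvStepA, hi, h1, h2]
  norm_num
  by_cases hx : x = '-' <;> by_cases hy : y = '-' <;> by_cases hz : z = '-'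
  all_goals simp only [hx, hy, hz, pvDig, not_true_eq_false, not_false_eq_true, ne_eq, reduceIte,
       if_true, if_false, s2, s1, s0, Nat.lor_assoc, o21, o43, o42, o41, o61]
  all_goals refine congrArg (fun p => List.foldl pvStepA p rest) (Prod.ext (by omega) ?_)
  all_goals first
       | (exact pv_shift_or acc hacc _ (by omega))
       | (exact pv_mul_or acc hacc _ (by omega))
       | (norm_num [Nat.shiftLeft_eq])

-- ===== VERDICT (by name: the statement is the Claim_ definition above) =====
theorem permission_string_to_octal_spec : Claim_equal_permission_string_to_octal := by
  intro s _
  unfold Spec_permission_string_to_octal permission_string_to_octal permission_string_to_octal_alt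
  by_cases h : PySem.Str.len s = 9
  · have h9 : ¬ (PySem.Str.len s ≠ 9) := by simpa using h
    have hl : s.toList.length = 9 := by
      have := PySem.Str.len_eq s
      omega
    obtain ⟨a, b, c, d, e, f, g, h', i, hcs⟩ := pv_exists9 s.toList hl
    rw [if_neg h9, if_neg h9, hcs]
    have d1 := pvDig_lt a b c
    have d2 := pvDig_lt d e f
    rw [pv_stepA_run3 0 0 (by norm_num) (by norm_num),
        pv_stepA_run3 3 _ (by norm_num) (by omega),
        pv_stepA_run3 6 _ (by norm_num) (by omega)]
    simp [PySem.List.slice, PySem.List.clampIdx, List.foldl, pvTripletDigit_eq]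
  · have h9 : PySem.Str.len s ≠ 9 := h
    rw [if_pos h9, if_pos h9]
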